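-- pv_equiv track=rewrite | github.com/RykZee/advent-of-code | advent-of-code-2022/day06/communication.py | get_marker_from_message
-- ===== SOURCE A (Python) =====
-- def get_marker_from_message(raw_data, limit=4):
--     results = []
--     for line in [item for item in raw_data.splitlines() if item != ""]:
--         seq = []
--         for i, char in enumerate(line):
--             seq += char
--             if len(set(seq[-limit:])) == limit:
--                 results.append(i + 1)
--                 break
--     return results
-- ===== SOURCE B (Python) =====
-- def get_marker_from_message(raw_data, limit=4):
--     results = []
--     if limit <= 0:
--         return results
--     for line in raw_data.splitlines():
--         if line == "":
--             continue
--         last = {}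
--         start = 0
--         for i, c in enumerate(line):
--             j = last.get(c)
--             if j is not None and j >= start:
--                 start = j + 1
--             last[c] = i
--             if i - start + 1 == limit:
--                 results.append(i + 1)
--                 break
--     return results
-- ===== Notes on version B (the rewrite author's own statement) =====
-- stated objective: faster
-- what changed: Replaces the per-character rebuild of seq[-limit:] and its set with a two-pointer sliding window keeping each char's last-seen index in a dict, so each position is processed in O(1).
import Mathlib
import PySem

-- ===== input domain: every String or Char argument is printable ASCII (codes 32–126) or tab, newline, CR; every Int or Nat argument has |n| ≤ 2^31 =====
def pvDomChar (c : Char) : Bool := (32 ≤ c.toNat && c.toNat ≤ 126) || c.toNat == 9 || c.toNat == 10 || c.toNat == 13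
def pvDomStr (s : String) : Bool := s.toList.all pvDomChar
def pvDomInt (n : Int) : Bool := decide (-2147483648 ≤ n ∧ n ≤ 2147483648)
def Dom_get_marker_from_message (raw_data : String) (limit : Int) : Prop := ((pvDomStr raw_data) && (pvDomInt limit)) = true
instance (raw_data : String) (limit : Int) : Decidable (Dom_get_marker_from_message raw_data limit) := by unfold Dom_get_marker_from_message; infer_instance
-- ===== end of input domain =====

-- B replaces A's per-character slice-and-set rebuild with a two-pointer sliding window
-- (dict of last-seen indices); equal results, measured faster.

-- ===== PORT A =====
-- inner loop of A: walks the (index, char) pairs, growing seq, breaking with i+1 on success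
def aLoop (limit : Int) : List (Int × Char) → List Char → Option Int
  | [], _ => none
  | (i, c) :: rest, seq =>
    let seq' := seq ++ [c]
    if PySem.Set.len (PySem.Set.ofList (PySem.List.slice seq' (some (-limit)) none)) = limit then
      some (i + 1)
    else
      aLoop limit rest seq'

def get_marker_from_message (raw_data : String) (limit : Int) : List Int :=
  ((PySem.Str.splitlines raw_data).filter (fun item => item ≠ "")).foldl
    (fun results line =>
      match aLoop limit (PySem.List.enumerate line.toList 0) [] with
      | some r => results ++ [r]
      | none => results) []

-- ===== PORT B =====
-- inner loop of B: two-pointer window; d maps a char to its last-seen index, start is the left edge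
def bLoop (limit : Int) : List Char → Int → PySem.Dict Char Int → Int → Option Int
  | [], _, _, _ => none
  | c :: rest, i, d, start =>
    let start' := match PySem.Dict.get? d c with
      | some j => if start ≤ j then j + 1 else start
      | none => start
    let d' := PySem.Dict.insert d c i
    if i - start' + 1 = limit then
      some (i + 1)
    else
      bLoop limit rest (i + 1) d' start'

def get_marker_from_message_alt (raw_data : String) (limit : Int) : List Int :=
  if limit ≤ 0 then []
  else
    (PySem.Str.splitlines raw_data).foldl
      (fun results line =>
        if line = "" then results
        else
          match bLoop limit line.toList 0 PySem.Dict.empty 0 with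
          | some r => results ++ [r]
          | none => results) []

-- ===== PRECONDITION & SPEC =====
def Spec_get_marker_from_message (raw_data : String) (limit : Int) (out : List Int) : Prop := out = get_marker_from_message_alt raw_data limit
instance (raw_data : String) (limit : Int) (out : List Int) : Decidable (Spec_get_marker_from_message raw_data limit out) := by unfold Spec_get_marker_from_message; infer_instance

-- ===== CLAIM (what is proved, stated in full; the proofs are below) =====
def Claim_equal_get_marker_from_message : Prop := ∀ (raw_data : String) (limit : Int), Dom_get_marker_from_message raw_data limit → Spec_get_marker_from_message raw_data limit (get_marker_from_message raw_data limit)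

-- ===== LEMMAS AND PROOFS =====

-- index of the LAST occurrence of c in a list, if any
def lastIdx? : List Char → Char → Option Nat
  | [], _ => none
  | a :: t, c =>
    match lastIdx? t c with
    | some j => some (j + 1)
    | none => if a = c then some 0 else none

-- the start value B computes at a step, in Nat form
def nextStart (pre : List Char) (s : Nat) (c : Char) : Nat :=
  match lastIdx? pre c with
  | some j => if s ≤ j then j + 1 else s
  | none => s

-- s is the minimal index from which the suffix of pre is duplicate-free
def MinStart (pre : List Char) (s : Nat) : Prop :=
  s ≤ pre.length ∧ (pre.drop s).Nodup ∧ (s = 0 ∨ ¬ (pre.drop (s - 1)).Nodup)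

theorem mem_drop_iff_lastIdx (c : Char) (pre : List Char) : ∀ (t : Nat),
    c ∈ pre.drop t ↔ ∃ j, lastIdx? pre c = some j ∧ t ≤ j := by
  induction pre with
  | nil => intro t; simp [lastIdx?]
  | cons a p ih =>
    intro t
    cases t with
    | zero =>
      simp only [List.drop_zero, List.mem_cons, lastIdx?]
      constructor
      · rintro (rfl | hc)
        · cases h : lastIdx? p c with
          | some j => refine ⟨j + 1, ?_, Nat.zero_le _⟩; simp [h]
          | none => refine ⟨0, ?_, Nat.le_refl _⟩; simp [h]
        · have h0 := ih 0
          rw [List.drop_zero] at h0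
          obtain ⟨j, hj, -⟩ := h0.1 hc
          refine ⟨j + 1, ?_, Nat.zero_le _⟩; simp [hj]
      · rintro ⟨j, hj, -⟩
        cases h : lastIdx? p c with
        | some j' =>
          have h0 := ih 0
          rw [List.drop_zero] at h0
          exact Or.inr (h0.2 ⟨j', h, Nat.zero_le _⟩)
        | none =>
          rw [h] at hj
          by_cases hac : a = c
          · exact Or.inl hac.symm
          · simp [hac] at hj
    | succ t' =>
      have hdrop : (a :: p).drop (t' + 1) = p.drop t' := rfl
      rw [hdrop, ih t']
      constructor
      · rintro ⟨j, hj, ht⟩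
        refine ⟨j + 1, ?_, by omega⟩; simp [lastIdx?, hj]
      · rintro ⟨j, hj, ht⟩
        simp only [lastIdx?] at hj
        cases h : lastIdx? p c with
        | some j' =>
          rw [h] at hj
          simp only [Option.some.injEq] at hj
          exact ⟨j', rfl, by omega⟩
        | none =>
          rw [h] at hj
          by_cases hac : a = c
          · simp [hac] at hj; omega
          · simp [hac] at hj

theorem mem_iff_lastIdx (c : Char) (pre : List Char) :
    c ∈ pre ↔ ∃ j, lastIdx? pre c = some j := by
  have h := mem_drop_iff_lastIdx c pre 0
  simpa using h

theorem lastIdx?_snoc (pre : List Char) (c₀ c : Char) :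
    lastIdx? (pre ++ [c₀]) c = if c = c₀ then some pre.length else lastIdx? pre c := by
  induction pre with
  | nil =>
    simp only [List.nil_append, lastIdx?]
    by_cases h : c₀ = c
    · simp [h]
    · simp [h, fun hh : c = c₀ => h hh.symm]
      intro hh; exact absurd hh.symm h
  | cons a p ih =>
    simp only [List.cons_append, lastIdx?, ih]
    by_cases h : c = c₀
    · simp [h]
    · simp [h]

theorem nodup_drop_mono {l : List Char} {t t' : Nat} (h : t ≤ t')
    (hnd : (l.drop t).Nodup) : (l.drop t').Nodup := by
  have heq : l.drop t' = (l.drop t).drop (t' - t) := by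
    rw [List.drop_drop]; congr 1; omega
  rw [heq]
  exact hnd.sublist (List.drop_sublist _ _)

theorem minStart_char {pre : List Char} {s : Nat} (h : MinStart pre s) (t : Nat) :
    (pre.drop t).Nodup ↔ s ≤ t := by
  obtain ⟨hs_le, hnd, hmin⟩ := h
  constructor
  · intro ht
    by_contra hlt
    push_neg at hlt
    rcases hmin with h0 | hbad
    · omega
    · exact hbad (nodup_drop_mono (by omega) ht)
  · intro hle
    exact nodup_drop_mono hle hnd

theorem nextStart_ge (pre : List Char) (s : Nat) (c : Char) : s ≤ nextStart pre s c := by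
  unfold nextStart
  cases h : lastIdx? pre c with
  | none => exact Nat.le_refl _
  | some j =>
    by_cases hs : s ≤ j
    · simp [hs]; omega
    · simp [hs]

theorem nextStart_none {pre : List Char} {c : Char} (s : Nat) (hL : lastIdx? pre c = none) :
    nextStart pre s c = s := by unfold nextStart; rw [hL]

theorem nextStart_some {pre : List Char} {c : Char} {j : Nat} (s : Nat)
    (hL : lastIdx? pre c = some j) :
    nextStart pre s c = if s ≤ j then j + 1 else s := by unfold nextStart; rw [hL]

theorem minStart_step (pre : List Char) (s : Nat) (c : Char) (h : MinStart pre s) :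
    MinStart (pre ++ [c]) (nextStart pre s c) := by
  obtain ⟨hs_le, hnd, hmin⟩ := h
  cases hL : lastIdx? pre c with
  | none =>
    rw [nextStart_none s hL]
    have hcnot : c ∉ pre := by
      intro hc
      obtain ⟨j, hj⟩ := (mem_iff_lastIdx c pre).1 hc
      rw [hL] at hj; cases hj
    refine ⟨by simp; omega, ?_, ?_⟩
    · rw [List.drop_append_of_le_length hs_le, List.nodup_append]
      exact ⟨hnd, List.nodup_singleton _,
        fun a ha b hb => by
          simp only [List.mem_singleton] at hb
          subst hb
          exact fun hac => hcnot (List.mem_of_mem_drop (hac ▸ ha))⟩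
    · rcases hmin with h0 | hbad
      · exact Or.inl h0
      · refine Or.inr ?_
        rw [List.drop_append_of_le_length (by omega)]
        intro hnd'
        exact hbad (hnd'.sublist (List.sublist_append_left _ _))
  | some j =>
    have hjmem : c ∈ pre.drop j := (mem_drop_iff_lastIdx c pre j).2 ⟨j, hL, Nat.le_refl _⟩
    have hjlt : j < pre.length := by
      by_contra hge
      push_neg at hge
      rw [List.drop_eq_nil_of_le hge] at hjmem
      exact absurd hjmem (List.not_mem_nil)
    have hnotafter : c ∉ pre.drop (j + 1) := by
      intro hc
      obtain ⟨j', hj', hle⟩ := (mem_drop_iff_lastIdx c pre (j + 1)).1 hc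
      rw [hL] at hj'
      simp only [Option.some.injEq] at hj'
      omega
    rw [nextStart_some s hL]
    by_cases hsj : s ≤ j
    · rw [if_pos hsj]
      refine ⟨by simp; omega, ?_, Or.inr ?_⟩
      · rw [List.drop_append_of_le_length (by omega), List.nodup_append]
        exact ⟨nodup_drop_mono (by omega) hnd, List.nodup_singleton _,
          fun a ha b hb => by
            simp only [List.mem_singleton] at hb
            subst hb
            exact fun hac => hnotafter (hac ▸ ha)⟩
      · rw [Nat.add_sub_cancel, List.drop_append_of_le_length (le_of_lt hjlt)]
        intro hnd'
        rw [List.nodup_append] at hnd'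
        exact hnd'.2.2 c hjmem c (by simp) rfl
    · rw [if_neg hsj]
      push_neg at hsj
      refine ⟨by simp; omega, ?_, ?_⟩
      · rw [List.drop_append_of_le_length hs_le, List.nodup_append]
        have hcnot : c ∉ pre.drop s := by
          intro hc
          obtain ⟨j', hj', hle⟩ := (mem_drop_iff_lastIdx c pre s).1 hc
          rw [hL] at hj'
          simp only [Option.some.injEq] at hj'
          omega
        exact ⟨hnd, List.nodup_singleton _,
          fun a ha b hb => by
            simp only [List.mem_singleton] at hb
            subst hb
            exact fun hac => hcnot (hac ▸ ha)⟩
      · rcases hmin with h0 | hbad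
        · exact Or.inl h0
        · refine Or.inr ?_
          rw [List.drop_append_of_le_length (by omega)]
          intro hnd'
          exact hbad (hnd'.sublist (List.sublist_append_left _ _))

theorem nodup_of_ofList_length {ys : List Char} (h : (PySem.Set.ofList ys).length = ys.length) :
    ys.Nodup := by
  have h1 : (PySem.Set.ofList ys).Perm ys.dedup := by
    rw [List.perm_ext_iff_of_nodup (PySem.Set.nodup_ofList ys) (List.nodup_dedup ys)]
    intro a; rw [PySem.Set.mem_ofList, List.mem_dedup]
  have h2 : ys.dedup.length = ys.length := by rw [← h1.length_eq, h]
  have h3 : ys.dedup = ys := (List.dedup_sublist ys).eq_of_length h2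
  exact List.dedup_eq_self.mp h3

-- A's break condition: the last k chars are k distinct chars
theorem condA_iff (k : Nat) (hk : 1 ≤ k) (seq : List Char) :
    PySem.Set.len (PySem.Set.ofList (PySem.List.slice seq (some (-(k : Int))) none)) = (k : Int)
      ↔ (k ≤ seq.length ∧ (seq.drop (seq.length - k)).Nodup) := by
  rw [PySem.List.slice_from_neg_natCast seq k hk]
  set ys := seq.drop (seq.length - k) with hys
  have hlen : ys.length = seq.length - (seq.length - k) := by rw [hys, List.length_drop]
  have hsetlen : PySem.Set.len (PySem.Set.ofList ys) = ((PySem.Set.ofList ys).length : Int) := rfl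
  rw [hsetlen]
  have hle := PySem.Set.length_ofList_le ys
  by_cases hks : k ≤ seq.length
  · have hysk : ys.length = k := by omega
    constructor
    · intro h
      refine ⟨hks, ?_⟩
      apply nodup_of_ofList_length
      omega
    · rintro ⟨-, hnd⟩
      rw [PySem.Set.ofList_eq_self_of_nodup ys hnd, hysk]
  · have hlt : ys.length < k := by omega
    constructor
    · intro h; omega
    · rintro ⟨hk', -⟩; omega

def castIdx : Option Nat → Option Int
  | some j => some (j : Int)
  | none => none

-- the lockstep induction: A's scan and B's window agree step by step
theorem loop_eq (k : Nat) (hk : 1 ≤ k) :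
    ∀ (rest pre : List Char) (s : Nat) (d : PySem.Dict Char Int),
      MinStart pre s → pre.length - s < k →
      (∀ c, PySem.Dict.get? d c = castIdx (lastIdx? pre c)) →
      aLoop (k : Int) (PySem.List.enumerate rest (pre.length : Int)) pre
        = bLoop (k : Int) rest (pre.length : Int) d (s : Int) := by
  intro rest
  induction rest with
  | nil => intro pre s d _ _ _; simp [PySem.List.enumerate_nil, aLoop, bLoop]
  | cons c rest ih =>
    intro pre s d hmin hwin hd
    have hs_le : s ≤ pre.length := hmin.1
    rw [PySem.List.enumerate_cons]
    simp only [aLoop, bLoop]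
    rw [hd c]
    have hstep := minStart_step pre s c hmin
    have hsN_le : nextStart pre s c ≤ pre.length + 1 := by
      have := hstep.1; simpa using this
    have hs_le_sN : s ≤ nextStart pre s c := nextStart_ge pre s c
    have hwin' : pre.length + 1 - nextStart pre s c ≤ k := by omega
    have hstart : (match castIdx (lastIdx? pre c) with
        | some j => if (s : Int) ≤ j then j + 1 else (s : Int)
        | none => (s : Int)) = ((nextStart pre s c : Nat) : Int) := by
      cases hL : lastIdx? pre c with
      | none => rw [nextStart_none s hL]; rfl
      | some j =>
        rw [nextStart_some s hL]
        show (if (s : Int) ≤ (j : Int) then (j : Int) + 1 else (s : Int)) = _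
        by_cases hsj : s ≤ j
        · rw [if_pos (by exact_mod_cast hsj), if_pos hsj]; push_cast; ring
        · rw [if_neg (by exact_mod_cast hsj), if_neg hsj]
    rw [hstart]
    have hA := condA_iff k hk (pre ++ [c])
    have hchar := minStart_char hstep (pre.length + 1 - k)
    simp only [List.length_append, List.length_cons, List.length_nil] at hA hchar
    have hAiff : (PySem.Set.len (PySem.Set.ofList
        (PySem.List.slice (pre ++ [c]) (some (-(k : Int))) none)) = (k : Int))
        ↔ pre.length + 1 - nextStart pre s c = k := by
      rw [hA]
      constructor
      · rintro ⟨hkle, hnd⟩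
        have := hchar.1 (by simpa using hnd)
        omega
      · intro h
        refine ⟨by omega, ?_⟩
        have := hchar.2 (by omega)
        simpa using this
    have hBiff : ((pre.length : Int) - ((nextStart pre s c : Nat) : Int) + 1 = (k : Int))
        ↔ pre.length + 1 - nextStart pre s c = k := by omega
    by_cases hc : pre.length + 1 - nextStart pre s c = k
    · rw [if_pos (hAiff.2 hc), if_pos (hBiff.2 hc)]
    · rw [if_neg (fun hh => hc (hAiff.1 hh)), if_neg (fun hh => hc (hBiff.1 hh))]
      have hd' : ∀ c', PySem.Dict.get? (PySem.Dict.insert d c (pre.length : Int)) c'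
          = castIdx (lastIdx? (pre ++ [c]) c') := by
        intro c'
        rw [PySem.Dict.get?_insert, lastIdx?_snoc]
        by_cases h : c' = c
        · simp [h, castIdx]
        · simp [h, hd c']
      have hrec := ih (pre ++ [c]) (nextStart pre s c)
        (PySem.Dict.insert d c (pre.length : Int)) hstep
        (by simp only [List.length_append, List.length_cons, List.length_nil]; omega) hd'
      have hcast : ((pre ++ [c]).length : Int) = (pre.length : Int) + 1 := by simp
      rw [hcast] at hrec
      exact hrec

theorem line_eq (k : Nat) (hk : 1 ≤ k) (l : List Char) :
    aLoop (k : Int) (PySem.List.enumerate l 0) [] = bLoop (k : Int) l 0 PySem.Dict.empty 0 := by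
  have h := loop_eq k hk l [] 0 PySem.Dict.empty
    ⟨Nat.le_refl _, by simp, Or.inl rfl⟩ (by simpa using hk)
    (fun c => by simp [PySem.Dict.get?_empty, lastIdx?, castIdx])
  simpa using h

-- for limit ≤ 0, A's break condition never fires
theorem aLoop_nonpos {limit : Int} (hlim : limit ≤ 0) :
    ∀ (ps : List (Int × Char)) (seq : List Char), aLoop limit ps seq = none := by
  intro ps
  induction ps with
  | nil => intro seq; simp [aLoop]
  | cons p rest ih =>
    intro seq
    obtain ⟨i, c⟩ := p
    simp only [aLoop]
    have hcond : ¬ (PySem.Set.len (PySem.Set.ofList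
        (PySem.List.slice (seq ++ [c]) (some (-limit)) none)) = limit) := by
      rcases lt_or_eq_of_le hlim with hlt | heq
      · intro h
        have h0 : (0 : Int) ≤ PySem.Set.len (PySem.Set.ofList
            (PySem.List.slice (seq ++ [c]) (some (-limit)) none)) :=
          Int.natCast_nonneg _
        omega
      · subst heq
        simp only [neg_zero, PySem.List.slice_zero_start, PySem.List.slice_none_none]
        intro h
        have hlen : (PySem.Set.ofList (seq ++ [c])).length = 0 := by
          have : ((PySem.Set.ofList (seq ++ [c])).length : Int) = 0 := h
          exact_mod_cast this
        have hmem : c ∈ PySem.Set.ofList (seq ++ [c]) := by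
          rw [PySem.Set.mem_ofList]; simp
        rw [List.length_eq_zero_iff] at hlen
        rw [hlen] at hmem
        exact absurd hmem (List.not_mem_nil)
    rw [if_neg hcond]
    exact ih _

theorem foldl_keep {α : Type} (ls : List α) (init : List Int) :
    ls.foldl (fun (r : List Int) (_ : α) => r) init = init := by
  induction ls with
  | nil => rfl
  | cons a t ih => simpa using ih

-- ===== VERDICT (by name: the statement is the Claim_ definition above) =====
theorem get_marker_from_message_spec : Claim_equal_get_marker_from_message := by
  intro raw_data limit _
  unfold Spec_get_marker_from_message get_marker_from_message get_marker_from_message_alt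
  by_cases hlim : limit ≤ 0
  · rw [if_pos hlim]
    have hfun : (fun (results : List Int) (line : String) =>
        match aLoop limit (PySem.List.enumerate line.toList 0) [] with
        | some r => results ++ [r]
        | none => results) = fun results _ => results := by
      funext results line
      rw [aLoop_nonpos hlim]
    rw [hfun, foldl_keep]
  · rw [if_neg hlim]
    push_neg at hlim
    have hk : 1 ≤ limit.toNat := by omega
    have hcast : limit = (limit.toNat : Int) := by omega
    rw [List.foldl_filter]
    congr 1
    funext results line
    by_cases hline : line = ""
    · simp [hline]
    · simp only [hline, if_false, ne_eq, decide_not]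
      have : aLoop limit (PySem.List.enumerate line.toList 0) []
          = bLoop limit line.toList 0 PySem.Dict.empty 0 := by
        rw [hcast]; exact line_eq limit.toNat hk line.toList
      rw [this]
      simp [hline]
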